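-- pv_equiv track=rewrite | github.com/john1571/RoboPoker | main.py | march_list
-- ===== SOURCE A (Python) =====
-- def march_list(array, list, up, start):
--     found = start
--     for value in list:
--         if value in array:
--             if up:
--                 found += 1
--             else:
--                 found -= 1
--         else:
--             return found
--     return found
-- ===== SOURCE B (Python) =====
-- def march_list(array, list, up, start):
--     members = set(array)
--     misses = [i for i, v in enumerate(list) if v not in members]
--     n = min(misses) if misses else len(list)
--     return start + n if up else start - n
-- ===== Notes on version B (the rewrite author's own statement) =====
-- stated objective: alternative
-- what changed: B builds a hash set of array, scans the ENTIRE list (no early return) collecting every index whose value is missing from the set, and takes the minimum such index (or len(list) if none) as the offset applied once to start; A walks a prefix with an early return and per-element +/-1 updates.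
import Mathlib
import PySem

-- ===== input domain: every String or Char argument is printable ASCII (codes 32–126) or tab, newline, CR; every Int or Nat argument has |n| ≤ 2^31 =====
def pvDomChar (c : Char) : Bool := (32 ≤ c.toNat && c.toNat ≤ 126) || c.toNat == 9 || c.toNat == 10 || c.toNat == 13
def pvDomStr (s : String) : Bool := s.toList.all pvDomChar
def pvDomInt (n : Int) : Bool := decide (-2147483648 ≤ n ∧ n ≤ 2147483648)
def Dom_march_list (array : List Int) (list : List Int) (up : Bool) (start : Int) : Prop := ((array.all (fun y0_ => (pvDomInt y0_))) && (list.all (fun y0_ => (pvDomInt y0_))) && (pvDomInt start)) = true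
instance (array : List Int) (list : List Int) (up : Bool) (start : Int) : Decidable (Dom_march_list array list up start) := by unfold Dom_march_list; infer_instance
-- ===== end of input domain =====

-- B replaces A's early-return prefix walk by a full scan collecting all miss indices and taking their minimum; alternative decomposition, not claimed faster.
-- ===== PORT A =====
def march_list (array : List Int) (list : List Int) (up : Bool) (start : Int) : Int :=
  -- found := start; for value in list: if value in array: found ±= 1 else: return found
  match list with
  | [] => start
  | value :: rest =>
    if value ∈ array then
      if up then march_list array rest up (start + 1)
      else march_list array rest up (start - 1)
    else start

-- ===== PORT B =====
def march_list_alt (array : List Int) (list : List Int) (up : Bool) (start : Int) : Int :=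
  let members := PySem.Set.ofList array
  -- [i for i, v in enumerate(list) if v not in members]
  let misses := (PySem.List.enumerate list).filterMap
    (fun p => if PySem.Set.contains members p.2 then none else some p.1)
  -- n = min(misses) if misses else len(list)
  let n : Int :=
    match PySem.List.min? misses (fun x => x) with
    | some m => m
    | none => (list.length : Int)
  if up then start + n else start - n

-- ===== PRECONDITION & SPEC =====
def Spec_march_list (array : List Int) (list : List Int) (up : Bool) (start : Int) (out : Int) : Prop := out = march_list_alt array list up start
instance (array : List Int) (list : List Int) (up : Bool) (start : Int) (out : Int) : Decidable (Spec_march_list array list up start out) := by unfold Spec_march_list; infer_instance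

-- ===== CLAIM =====
def Claim_equal_march_list : Prop := ∀ (array : List Int) (list : List Int) (up : Bool) (start : Int), Dom_march_list array list up start → Spec_march_list array list up start (march_list array list up start)

-- ===== LEMMAS AND PROOFS =====

-- the miss-index list, generalized over the enumeration start (missAux m l 0 is B's `misses`)
def missAux (members : PySem.Set Int) (l : List Int) (s : Int) : List Int :=
  (PySem.List.enumerate l s).filterMap
    (fun p => if PySem.Set.contains members p.2 then none else some p.1)

lemma missAux_nil (members : PySem.Set Int) (s : Int) : missAux members [] s = [] := rfl

lemma missAux_cons (members : PySem.Set Int) (v : Int) (rest : List Int) (s : Int) :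
    missAux members (v :: rest) s =
      if PySem.Set.contains members v then missAux members rest (s + 1)
      else s :: missAux members rest (s + 1) := by
  simp [missAux, PySem.List.enumerate_cons, List.filterMap]
  split_ifs <;> simp

lemma missAux_ge (members : PySem.Set Int) (l : List Int) (s : Int) :
    ∀ x ∈ missAux members l s, s ≤ x := by
  induction l generalizing s with
  | nil => simp [missAux_nil]
  | cons v rest ih =>
    intro x hx
    rw [missAux_cons] at hx
    split_ifs at hx with h
    · have := ih (s + 1) x hx; omega
    · rcases List.mem_cons.mp hx with rfl | hx'
      · omega
      · have := ih (s + 1) x hx'; omega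

lemma foldl_min_of_ge (s : Int) : ∀ (t : List Int), (∀ x ∈ t, s ≤ x) → t.foldl min s = s
  | [], _ => rfl
  | x :: t, h => by
    have hx : min s x = s := min_eq_left (h x List.mem_cons_self)
    simp only [List.foldl, hx]
    exact foldl_min_of_ge s t (fun y hy => h y (List.mem_cons_of_mem x hy))

lemma missAux_min (members : PySem.Set Int) (l : List Int) (s : Int) :
    (match PySem.List.min? (missAux members l s) (fun x => x) with
      | some m => m
      | none => s + (l.length : Int)) =
      s + ((l.takeWhile (fun v => PySem.Set.contains members v)).length : Int) := by
  induction l generalizing s with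
  | nil => simp [missAux_nil, PySem.List.min?]
  | cons v rest ih =>
    rw [missAux_cons]
    by_cases h : PySem.Set.contains members v = true
    · rw [if_pos h]
      have hv : v ∈ members := by simpa using h
      have htw : List.takeWhile (fun v => PySem.Set.contains members v) (v :: rest)
          = v :: List.takeWhile (fun v => PySem.Set.contains members v) rest := by
        simp [hv]
      rw [htw]
      have hrec := ih (s + 1)
      cases hm : PySem.List.min? (missAux members rest (s + 1)) (fun x => x) with
      | none =>
        simp [hm] at hrec ⊢
        omega
      | some m =>
        simp [hm] at hrec ⊢
        omega
    · rw [if_neg h, PySem.List.min?_id_cons,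
        foldl_min_of_ge s _ (fun x hx => by
          have := missAux_ge members rest (s + 1) x hx; omega)]
      have hv : v ∉ members := by simpa using h
      have htw : List.takeWhile (fun v => PySem.Set.contains members v) (v :: rest) = [] := by
        simp [hv]
      rw [htw]
      simp

lemma march_closed (array : List Int) (list : List Int) (up : Bool) (start : Int) :
    march_list array list up start =
      (if up then
        start + ((list.takeWhile (fun v => PySem.Set.contains (PySem.Set.ofList array) v)).length : Int)
      else
        start - ((list.takeWhile (fun v => PySem.Set.contains (PySem.Set.ofList array) v)).length : Int)) := by
  induction list generalizing start with
  | nil => cases up <;> simp [march_list]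
  | cons v rest ih =>
    have hmem : PySem.Set.contains (PySem.Set.ofList array) v = decide (v ∈ array) := by
      simp [PySem.Set.contains_eq_listContains, PySem.Set.mem_ofList]
    by_cases hv : v ∈ array
    · have h1 := ih (start + 1)
      have h2 := ih (start - 1)
      cases up <;> simp_all [march_list, List.takeWhile] <;> omega
    · cases up <;> simp [march_list, List.takeWhile, hmem, hv]

-- ===== VERDICT =====
theorem march_list_spec : Claim_equal_march_list := by
  intro array list up start _
  unfold Spec_march_list
  have h := missAux_min (PySem.Set.ofList array) list 0
  simp only [zero_add] at h
  show march_list array list up start =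
    (if up then
      start + (match PySem.List.min? (missAux (PySem.Set.ofList array) list 0) (fun x => x) with
        | some m => m
        | none => (list.length : Int))
     else
      start - (match PySem.List.min? (missAux (PySem.Set.ofList array) list 0) (fun x => x) with
        | some m => m
        | none => (list.length : Int)))
  rw [march_closed, h]
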